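-- pv_equiv track=rewrite | github.com/ThatmewH/Wizard101Bot-Selenium-Captcha | question_answerers.py | _get_index_of_largest_element
-- ===== SOURCE A (Python) =====
-- def _get_index_of_largest_element(element_list):
--     highest_scored_indexs = []
--     highest_simular_score = 0
--     for x in range(len(element_list)):
--         if element_list[x] == highest_simular_score:
--             highest_scored_indexs.append(x)
--
--         elif element_list[x] > highest_simular_score:
--             highest_scored_indexs = [x]
--             highest_simular_score = element_list[x]
--
--     if highest_simular_score == 0:
--         return None
--
--     return highest_scored_indexs
-- ===== SOURCE B (Python) =====
-- def _get_index_of_largest_element(element_list):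
--     if not element_list:
--         return None
--     m = max(element_list)
--     if m <= 0:
--         return None
--     return [i for i, v in enumerate(element_list) if v == m]
-- ===== Notes on version B (the rewrite author's own statement) =====
-- stated objective: simpler
-- what changed: Replaces the single-pass running-max state machine (list of indices rebuilt on every new maximum) with a two-phase max-then-filter decomposition: compute m = max once, return None if m <= 0, else the enumerate-filter comprehension of indices equal to m.
import Mathlib
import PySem

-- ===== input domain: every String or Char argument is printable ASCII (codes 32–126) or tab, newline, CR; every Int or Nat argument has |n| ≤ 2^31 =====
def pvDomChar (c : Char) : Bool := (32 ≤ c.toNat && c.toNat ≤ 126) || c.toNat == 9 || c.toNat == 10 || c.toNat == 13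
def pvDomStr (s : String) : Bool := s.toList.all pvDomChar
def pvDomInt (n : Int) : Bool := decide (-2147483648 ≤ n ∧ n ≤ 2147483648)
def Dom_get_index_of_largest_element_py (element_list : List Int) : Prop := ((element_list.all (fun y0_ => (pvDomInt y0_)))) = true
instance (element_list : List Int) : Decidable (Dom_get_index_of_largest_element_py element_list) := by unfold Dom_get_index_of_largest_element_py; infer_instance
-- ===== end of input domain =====

-- B replaces A's single-pass running-max state machine by a max-then-filter decomposition (simpler; same cost).

-- ===== PORT A =====
-- the 'for x in range(len(element_list))' loop, walking the list while carrying the index x,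
-- with A's state (highest_scored_indexs, highest_simular_score) and its branches in order
def pvLoopA : List Int → Int → List Int → Int → (List Int × Int)
  | [], _, acc, s => (acc, s)
  | v :: t, i, acc, s =>
    if v = s then pvLoopA t (i + 1) (acc ++ [i]) s
    else if v > s then pvLoopA t (i + 1) [i] v
    else pvLoopA t (i + 1) acc s

def get_index_of_largest_element_py (element_list : List Int) : Option (List Int) :=
  let r := pvLoopA element_list 0 [] 0
  if r.2 = 0 then none else some r.1

-- ===== PORT B =====
def get_index_of_largest_element_py_alt (element_list : List Int) : Option (List Int) :=
  match element_list with
  | [] => none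
  | x :: t =>
    match PySem.List.max? (x :: t) (fun y => y) with
    | none => none
    | some m =>
      if m ≤ 0 then none
      else some (((PySem.List.enumerate (x :: t) 0).filter (fun p => p.2 == m)).map (·.1))

-- ===== PRECONDITION & SPEC =====
def Spec_get_index_of_largest_element_py (element_list : List Int) (out : Option (List Int)) : Prop := out = get_index_of_largest_element_py_alt element_list
instance (element_list : List Int) (out : Option (List Int)) : Decidable (Spec_get_index_of_largest_element_py element_list out) := by unfold Spec_get_index_of_largest_element_py; infer_instance

-- ===== CLAIM (what is proved, stated in full; the proofs are below) =====
def Claim_equal_get_index_of_largest_element_py : Prop := ∀ (element_list : List Int), Dom_get_index_of_largest_element_py element_list → Spec_get_index_of_largest_element_py element_list (get_index_of_largest_element_py element_list)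

-- ===== LEMMAS AND PROOFS =====

-- indices (counting from i) of the occurrences of m in xs
def pvIdxOf : List Int → Int → Int → List Int
  | [], _, _ => []
  | v :: t, i, m => (if v = m then [i] else []) ++ pvIdxOf t (i + 1) m

theorem pvLoopA_eq (xs : List Int) : ∀ (i : Int) (acc : List Int) (s : Int),
    pvLoopA xs i acc s =
      ((if List.foldl max s xs = s then acc else []) ++ pvIdxOf xs i (List.foldl max s xs),
       List.foldl max s xs) := by
  induction xs with
  | nil => intro i acc s; simp [pvLoopA, pvIdxOf]
  | cons v t ih =>
    intro i acc s
    by_cases hvs : v = s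
    · subst hvs
      simp only [pvLoopA, List.foldl_cons, max_self]
      rw [ih]
      by_cases hM : List.foldl max v t = v
      · simp [pvIdxOf, hM]
      · simp [pvIdxOf, hM]
        intro hvM; exact hM hvM.symm
    · by_cases hgt : v > s
      · simp only [pvLoopA, if_neg hvs, if_pos hgt, List.foldl_cons]
        rw [ih]
        have hvle : v ≤ List.foldl max v t := (PySem.List.le_foldl_max t v).1
        have hmax : max s v = v := max_eq_right (le_of_lt hgt)
        simp only [hmax]
        have hMne : List.foldl max v t ≠ s := by
          intro h; exact absurd (h ▸ hvle) (not_le.mpr hgt)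
        by_cases hM : List.foldl max v t = v
        · simp [pvIdxOf, hM, hvs]
        · simp [pvIdxOf, hM, hMne]
          intro hvM; exact hM hvM.symm
      · have hlt : v < s := lt_of_le_of_ne (not_lt.mp hgt) hvs
        simp only [pvLoopA, if_neg hvs, if_neg hgt, List.foldl_cons]
        rw [ih]
        have hmax : max s v = s := max_eq_left (le_of_lt hlt)
        simp only [hmax]
        have hsle : s ≤ List.foldl max s t := (PySem.List.le_foldl_max t s).1
        have hvM : v ≠ List.foldl max s t := ne_of_lt (lt_of_lt_of_le hlt hsle)
        simp [pvIdxOf, hvM]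

theorem pvFilter_enum_eq (xs : List Int) : ∀ (i m : Int),
    ((PySem.List.enumerate xs i).filter (fun p => p.2 == m)).map (·.1) = pvIdxOf xs i m := by
  induction xs with
  | nil => intro i m; simp [PySem.List.enumerate_nil, pvIdxOf]
  | cons v t ih =>
    intro i m
    rw [PySem.List.enumerate_cons]
    by_cases h : v = m
    · simp [h, pvIdxOf, ih]
    · simp [h, pvIdxOf, ih]

theorem pvFoldl_max_left (t : List Int) : ∀ (a b : Int),
    List.foldl max (max a b) t = max a (List.foldl max b t) := by
  induction t with
  | nil => intro a b; simp
  | cons c t ih =>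
    intro a b
    simp only [List.foldl_cons, max_assoc, ih]

-- ===== VERDICT (by name: the statement is the Claim_ definition above) =====
theorem get_index_of_largest_element_py_spec : Claim_equal_get_index_of_largest_element_py := by
  intro xs _
  unfold Spec_get_index_of_largest_element_py get_index_of_largest_element_py get_index_of_largest_element_py_alt
  match xs with
  | [] => simp [pvLoopA]
  | x :: t =>
    dsimp only
    rw [PySem.List.max?_id_cons]
    simp only [pvLoopA_eq, ite_self, List.nil_append]
    have hM : List.foldl max 0 (x :: t) = max 0 (List.foldl max x t) := by
      rw [List.foldl_cons]; exact pvFoldl_max_left t 0 x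
    simp only [hM]
    by_cases hle : List.foldl max x t ≤ 0
    · rw [max_eq_left hle, if_pos rfl, if_pos hle]
    · have hpos : 0 < List.foldl max x t := not_le.mp hle
      rw [max_eq_right (le_of_lt hpos), if_neg (ne_of_gt hpos), if_neg hle, pvFilter_enum_eq]
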